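-- pv_equiv track=rewrite | github.com/Galaga0/FM26_Companion_App | fm26_helper_app.py | compute_primary_position
-- ===== SOURCE A (Python) =====
-- PITCH_ORDER = [
--     "GK",
--     "LB", "LWB",
--     "CB",
--     "RB", "RWB",
--     "CDM",
--     "CM",
--     "LM", "LW",
--     "RM", "RW",
--     "CAM",
--     "ST",
-- ]
--
-- def position_sort_key(pos: str) -> int:
--     pos_u = (pos or "").upper()
--     return PITCH_ORDER.index(pos_u) if pos_u in PITCH_ORDER else 999
--
-- def compute_primary_position(player: dict) -> str | None:
--     """Return the player's primary position based on the highest rating."""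
--     pos_ratings = player.get("position_ratings") or {}
--     if not pos_ratings:
--         return None
--
--     # highest rating
--     best_val = max(pos_ratings.values())
--     best_positions = [pos for pos, val in pos_ratings.items() if val == best_val]
--
--     # tie-break with pitch order
--     best_positions.sort(key=position_sort_key)
--     return best_positions[0] if best_positions else None
-- ===== SOURCE B (Python) =====
-- PITCH_ORDER = [
--     "GK",
--     "LB", "LWB",
--     "CB",
--     "RB", "RWB",
--     "CDM",
--     "CM",
--     "LM", "LW",
--     "RM", "RW",
--     "CAM",
--     "ST",
-- ]
--
-- def position_sort_key(pos: str) -> int: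
--     pos_u = (pos or "").upper()
--     return PITCH_ORDER.index(pos_u) if pos_u in PITCH_ORDER else 999
--
-- def compute_primary_position(player: dict) -> str | None:
--     """Return the player's primary position based on the highest rating."""
--     pos_ratings = player.get("position_ratings") or {}
--     if not pos_ratings:
--         return None
--     # one-pass selection: highest rating first (negated), then pitch order;
--     # min() keeps the first item achieving the minimum, matching the stable tie-break
--     return min(pos_ratings.items(),
--                key=lambda kv: (-kv[1], position_sort_key(kv[0])))[0]
-- ===== Notes on version B (the rewrite author's own statement) =====
-- stated objective: simpler
-- what changed: Replaced the three-pass max/filter/stable-sort pipeline with a single min() selection over the items using the composite key (-rating, pitch-order), relying on min returning the first minimizer to reproduce the stable tie-break.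
import Mathlib
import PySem

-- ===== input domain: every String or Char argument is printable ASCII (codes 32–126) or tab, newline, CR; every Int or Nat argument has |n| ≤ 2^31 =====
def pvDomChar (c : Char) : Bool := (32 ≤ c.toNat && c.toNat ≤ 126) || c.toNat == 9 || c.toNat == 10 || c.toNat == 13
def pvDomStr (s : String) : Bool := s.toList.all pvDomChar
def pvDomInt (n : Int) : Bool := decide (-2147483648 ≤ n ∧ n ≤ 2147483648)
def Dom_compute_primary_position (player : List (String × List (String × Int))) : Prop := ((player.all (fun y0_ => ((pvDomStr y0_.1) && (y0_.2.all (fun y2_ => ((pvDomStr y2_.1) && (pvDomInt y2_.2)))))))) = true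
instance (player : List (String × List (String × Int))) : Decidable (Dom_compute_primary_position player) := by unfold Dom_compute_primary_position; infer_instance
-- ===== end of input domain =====

-- B replaces A's max/filter/stable-sort pipeline by one min2? selection with a
-- composite key (simpler, one pass); return values proved equal on all inputs.

-- ===== PORT A =====
def PITCH_ORDER : List String :=
  ["GK", "LB", "LWB", "CB", "RB", "RWB", "CDM", "CM", "LM", "LW", "RM", "RW", "CAM", "ST"]

-- `(pos or "").upper()`: for a str argument `pos or ""` is `pos` itself (also when empty)
def position_sort_key (pos : String) : Int :=
  let pos_u := PySem.Str.upper pos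
  if PITCH_ORDER.contains pos_u then
    match PySem.List.index? PITCH_ORDER pos_u with
    | some i => (i : Int)
    | none => 999
  else 999

def compute_primary_position (player : List (String × List (String × Int))) : Option String :=
  -- player.get("position_ratings") or {}
  let pos_ratings : PySem.Dict String Int :=
    match (PySem.Dict.ofList player).get? "position_ratings" with
    | some l => PySem.Dict.ofList l
    | none => PySem.Dict.empty
  if pos_ratings.size = 0 then none
  else
    match PySem.List.max? pos_ratings.values (fun v => v) with
    | none => none   -- unreachable: values is nonempty here
    | some best_val =>
      let best_positions :=
        (pos_ratings.items.filter (fun kv => kv.2 == best_val)).map (fun kv => kv.1)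
      match PySem.List.sorted best_positions position_sort_key false with
      | p :: _ => some p
      | [] => none

-- ===== PORT B =====
def compute_primary_position_alt (player : List (String × List (String × Int))) : Option String :=
  -- player.get("position_ratings") or {}
  let pos_ratings : PySem.Dict String Int :=
    match (PySem.Dict.ofList player).get? "position_ratings" with
    | some l => PySem.Dict.ofList l
    | none => PySem.Dict.empty
  if pos_ratings.size = 0 then none
  else
    match PySem.List.min2? pos_ratings.items
        (fun kv => -kv.2) (fun kv => position_sort_key kv.1) with
    | some kv => some kv.1
    | none => none

-- ===== PRECONDITION & SPEC =====
def Spec_compute_primary_position (player : List (String × List (String × Int))) (out : Option String) : Prop := out = compute_primary_position_alt player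
instance (player : List (String × List (String × Int))) (out : Option String) : Decidable (Spec_compute_primary_position player out) := by unfold Spec_compute_primary_position; infer_instance

-- ===== CLAIM (what is proved, stated in full; the proofs are below) =====
def Claim_equal_compute_primary_position : Prop := ∀ (player : List (String × List (String × Int))), Dom_compute_primary_position player → Spec_compute_primary_position player (compute_primary_position player)

-- ===== LEMMAS AND PROOFS =====

theorem sorted_snoc {α κ : Type} [LT κ] [DecidableLT κ] (zs : List α) (a : α) (key : α → κ) :
    PySem.List.sorted (zs ++ [a]) key false
      = PySem.List.insertBy (fun p q => decide (key p < key q)) a (PySem.List.sorted zs key false) := by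
  rw [PySem.List.sorted_eq_foldl_insertBy, PySem.List.sorted_eq_foldl_insertBy, List.foldl_append]
  rfl

-- the joint invariant of A's pipeline and B's one-pass selection over the items list
theorem best_invariant (l : List (String × Int)) : l ≠ [] →
    ∃ (m : String × Int) (rest : List String),
      PySem.List.min2? l (fun kv => -kv.2) (fun kv => position_sort_key kv.1) = some m ∧
      PySem.List.max? (l.map (fun kv => kv.2)) (fun v => v) = some m.2 ∧
      (∀ kv ∈ l, kv.2 ≤ m.2) ∧
      PySem.List.sorted ((l.filter (fun kv => kv.2 == m.2)).map (fun kv => kv.1))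
        position_sort_key false = m.1 :: rest := by
  induction l using List.reverseRecOn with
  | nil => intro h; exact absurd rfl h
  | append_singleton l y IH =>
    intro _
    by_cases hl : l = []
    · subst hl
      refine ⟨y, [], ?_, ?_, ?_, ?_⟩
      · rfl
      · rfl
      · intro kv hkv; simp at hkv; subst hkv; exact le_refl _
      · simp [PySem.List.sorted, PySem.List.insertBy]
    · obtain ⟨m, rest, hmin, hmax, hbound, hsort⟩ := IH hl
      simp only [PySem.List.min2?] at hmin ⊢
      simp only [PySem.List.max?] at hmax ⊢
      rw [List.map_append, List.foldl_append, List.foldl_append]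
      rw [hmax]
      rw [hmin]
      rcases lt_trichotomy y.2 m.2 with hy | hy | hy
      · -- y is strictly worse: everything unchanged
        refine ⟨m, rest, ?_, ?_, ?_, ?_⟩
        · have h1 : ¬ (-y.2 < -m.2) := by omega
          have h2 : (-m.2 < -y.2) := by omega
          simp [List.foldl, h1, h2]
        · have : ¬ (m.2 < y.2) := by omega
          simp [List.foldl, this]
        · intro kv hkv
          rcases List.mem_append.mp hkv with h | h
          · exact hbound kv h
          · simp at h; subst h; omega
        · rw [List.filter_append]
          have hne2 : (y.2 == m.2) = false := beq_eq_false_iff_ne.mpr (by omega)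
          have : List.filter (fun kv => kv.2 == m.2) [y] = [] := by
            simp [List.filter, hne2]
          rw [this, List.append_nil, hsort]
      · -- tie on the rating: stable insert vs. lexicographic second component
        have h1 : ¬ (-y.2 < -m.2) := by omega
        have h2 : ¬ (-m.2 < -y.2) := by omega
        have hfil : List.filter (fun kv => kv.2 == m.2) [y] = [y] := by
          simp [List.filter, hy]
        by_cases hc : position_sort_key y.1 < position_sort_key m.1
        · refine ⟨y, m.1 :: rest, ?_, ?_, ?_, ?_⟩
          · simp [List.foldl, h1, h2, hc]
          · have : ¬ (m.2 < y.2) := by omega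
            simp [List.foldl, hy]
          · intro kv hkv
            rcases List.mem_append.mp hkv with h | h
            · have := hbound kv h; omega
            · simp at h; subst h; exact le_refl _
          · rw [show (fun (kv : String × Int) => kv.2 == y.2)
                  = (fun (kv : String × Int) => kv.2 == m.2) from by funext kv; rw [hy]]
            rw [List.filter_append, hfil, List.map_append]
            simp only [List.map_cons, List.map_nil]
            rw [sorted_snoc, hsort]
            simp [PySem.List.insertBy, hc]
        · refine ⟨m, PySem.List.insertBy
              (fun p q => decide (position_sort_key p < position_sort_key q)) y.1 rest, ?_, ?_, ?_, ?_⟩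
          · simp [List.foldl, h1, h2, hc]
          · have : ¬ (m.2 < y.2) := by omega
            simp [List.foldl, this]
          · intro kv hkv
            rcases List.mem_append.mp hkv with h | h
            · exact hbound kv h
            · simp at h; subst h; omega
          · rw [List.filter_append, hfil, List.map_append]
            simp only [List.map_cons, List.map_nil]
            rw [sorted_snoc, hsort]
            simp [PySem.List.insertBy, hc]
      · -- y strictly better: it takes over everywhere
        refine ⟨y, [], ?_, ?_, ?_, ?_⟩
        · have h1 : (-y.2 < -m.2) := by omega
          simp [List.foldl, h1]
        · have : (m.2 < y.2) := hy
          simp [List.foldl, this]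
        · intro kv hkv
          rcases List.mem_append.mp hkv with h | h
          · have := hbound kv h; omega
          · simp at h; subst h; exact le_refl _
        · rw [List.filter_append]
          have hnil : List.filter (fun kv => kv.2 == y.2) l = [] := by
            rw [List.filter_eq_nil_iff]
            intro kv hkv
            have := hbound kv hkv
            simp; omega
          have hone : List.filter (fun kv => kv.2 == y.2) [y] = [y] := by
            simp [List.filter]
          rw [hnil, hone]
          simp [PySem.List.sorted, PySem.List.insertBy]

-- ===== VERDICT (by name: the statement is the Claim_ definition above) =====
theorem compute_primary_position_spec : Claim_equal_compute_primary_position := by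
  intro player _
  unfold Spec_compute_primary_position compute_primary_position compute_primary_position_alt
  rcases hg : (PySem.Dict.ofList player).get? "position_ratings" with _ | l
  · rfl
  · simp only []
    by_cases hs : (PySem.Dict.ofList l).size = 0
    · simp [hs]
    · have hne : (PySem.Dict.ofList l).items ≠ [] := by
        intro h
        exact hs (by simp [PySem.Dict.size, h])
      obtain ⟨m, rest, hmin, hmax, hbound, hsort⟩ := best_invariant _ hne
      simp only [hs, if_false]
      rw [show (PySem.Dict.ofList l).values = (PySem.Dict.ofList l).items.map (fun kv => kv.2) from rfl]
      rw [hmax, hmin]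
      simp only [hsort]
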